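-- pv_equiv track=rewrite | github.com/TomerGodelli/SmileAttendance | attendance_checker.py | summerize_results
-- ===== SOURCE A (Python) =====
-- def updated_user_name(name, names_attendanced):
--     i = 2
--     updated_name = name
--     while 1:
--         if updated_name in names_attendanced:
--             updated_name = name + ' ' + str(i)
--             i += 1
--         else:
--             names_attendanced.append(updated_name)
--             return updated_name
--
-- def summerize_results(participants):
--     """
--     return sumurized lists of smiling,not smiling and unidentified participants with their name and image
--     :param participants: list of participants tuples of (name,isSmile,img)
--     :return: 3 list of tuples(name,img)
--     """
--     smiling = []
--     not_smiling = []
--     unidentified = []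
--     for p in participants.values():
--         if not p[0]:  # un identified name
--             unidentified.append(p)
--         else:
--             username = p[0]
--             updated_username = updated_user_name(username, [i[0] for i in smiling])
--             smiling.append((updated_username, p[2])) if p[1] else not_smiling.append(p)
--     return smiling, not_smiling, unidentified
-- ===== SOURCE B (Python) =====
-- def summerize_results(participants):
--     vals = list(participants.values())
--     unidentified = [p for p in vals if not p[0]]
--     not_smiling = [p for p in vals if p[0] and not p[1]]
--     smiling = []
--     taken = set()
--     next_i = {}
--     for name, img in ((p[0], p[2]) for p in vals if p[0] and p[1]):
--         if name not in taken:
--             final = name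
--         else:
--             i = next_i.get(name, 2)
--             while name + ' ' + str(i) in taken:
--                 i += 1
--             final = name + ' ' + str(i)
--             next_i[name] = i + 1
--         taken.add(final)
--         smiling.append((final, img))
--     return smiling, not_smiling, unidentified
-- ===== Notes on version B (the rewrite author's own statement) =====
-- stated objective: faster
-- what changed: A deduplicates each smiling name by rebuilding the list of taken names and linearly rescanning it from suffix 2 for every participant; B keeps a hash set of taken names plus a per-name next-suffix counter dict, so each name is finalized with O(1) expected set lookups and no restart from 2, after a separate categorization pass.
import Mathlib
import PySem

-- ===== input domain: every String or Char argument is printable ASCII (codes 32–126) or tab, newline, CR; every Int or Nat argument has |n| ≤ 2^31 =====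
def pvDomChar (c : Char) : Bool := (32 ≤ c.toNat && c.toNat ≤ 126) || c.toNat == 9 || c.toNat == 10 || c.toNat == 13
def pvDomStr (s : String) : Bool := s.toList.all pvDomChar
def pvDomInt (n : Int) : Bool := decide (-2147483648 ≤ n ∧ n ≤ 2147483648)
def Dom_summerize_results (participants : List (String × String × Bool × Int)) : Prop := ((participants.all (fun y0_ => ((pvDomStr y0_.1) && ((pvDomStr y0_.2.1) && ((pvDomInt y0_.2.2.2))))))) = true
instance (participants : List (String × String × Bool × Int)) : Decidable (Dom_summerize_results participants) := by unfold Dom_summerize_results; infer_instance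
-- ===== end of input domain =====

-- B replaces A's per-participant rebuild-and-rescan-from-2 of the taken-name list by a set of
-- taken names plus a per-name next-suffix counter dict (a timing run measured B faster);
-- same return value.

-- ===== PORT A =====
-- while-loop of updated_user_name; fuel att.length+1 suffices because the candidate
-- names (name, name+' 2', name+' 3', …) are pairwise distinct, so at most att.length
-- membership tests can succeed — with sufficient fuel this is exactly Python's loop.
def uunGo (name : String) (att : List String) (updated : String) (i : Int) : Nat → String
  | 0 => updated
  | Nat.succ fuel =>
      if updated ∈ att then uunGo name att (name ++ " " ++ PySem.Int.toStr i) (i + 1) fuel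
      else updated

def updated_user_name (name : String) (names_attendanced : List String) : String :=
  uunGo name names_attendanced name 2 (names_attendanced.length + 1)

def summerize_results (participants : List (String × String × Bool × Int)) : (List (String × Int)) × (List (String × Bool × Int)) × (List (String × Bool × Int)) :=
  ((PySem.Dict.ofList participants).values).foldl
    (fun acc p =>
      match acc with
      | (smiling, not_smiling, unidentified) =>
        if p.1 = "" then  -- 'not p[0]': the empty string is the only falsy str
          (smiling, not_smiling, unidentified ++ [p])
        else
          let username := p.1
          let updated_username := updated_user_name username (smiling.map (·.1))
          if p.2.1 then (smiling ++ [(updated_username, p.2.2)], not_smiling, unidentified)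
          else (smiling, not_smiling ++ [p], unidentified))
    ([], [], [])

-- ===== PORT B =====
-- B's while-loop 'while name + ' ' + str(i) in taken: i += 1', returning the final i;
-- fuel taken.length+1 suffices (candidates pairwise distinct, so at most taken.length hits).
def bScan (name : String) (taken : PySem.Set String) (i : Int) : Nat → Int
  | 0 => i
  | Nat.succ fuel =>
      if (name ++ " " ++ PySem.Int.toStr i) ∈ taken then bScan name taken (i + 1) fuel
      else i

def summerize_results_alt (participants : List (String × String × Bool × Int)) : (List (String × Int)) × (List (String × Bool × Int)) × (List (String × Bool × Int)) :=
  let vals := (PySem.Dict.ofList participants).values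
  let unidentified := vals.filter (fun p => p.1 == "")
  let not_smiling := vals.filter (fun p => p.1 != "" && !p.2.1)
  let cands := (vals.filter (fun p => p.1 != "" && p.2.1)).map (fun p => (p.1, p.2.2))
  let res := cands.foldl
    (fun (acc : List (String × Int) × PySem.Set String × PySem.Dict String Int) c =>
      match acc with
      | (smiling, taken, next_i) =>
        if c.1 ∈ taken then
          let i0 := next_i.getD c.1 2
          let k := bScan c.1 taken i0 (taken.length + 1)
          let final := c.1 ++ " " ++ PySem.Int.toStr k
          (smiling ++ [(final, c.2)], PySem.Set.add taken final, next_i.insert c.1 (k + 1))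
        else
          (smiling ++ [(c.1, c.2)], PySem.Set.add taken c.1, next_i))
    ([], PySem.Set.empty, PySem.Dict.empty)
  (res.1, not_smiling, unidentified)

-- ===== PRECONDITION & SPEC =====
def Spec_summerize_results (participants : List (String × String × Bool × Int)) (out : (List (String × Int)) × (List (String × Bool × Int)) × (List (String × Bool × Int))) : Prop := out = summerize_results_alt participants
instance (participants : List (String × String × Bool × Int)) (out : (List (String × Int)) × (List (String × Bool × Int)) × (List (String × Bool × Int))) : Decidable (Spec_summerize_results participants out) := by unfold Spec_summerize_results; infer_instance

-- ===== CLAIM (what is proved, stated in full; the proofs are below) =====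
def Claim_equal_summerize_results : Prop := ∀ (participants : List (String × String × Bool × Int)), Dom_summerize_results participants → Spec_summerize_results participants (summerize_results participants)

-- ===== LEMMAS AND PROOFS =====

-- the candidate name 'name + " " + str(i)'
def candN (name : String) (i : Int) : String := name ++ " " ++ PySem.Int.toStr i

-- ---- injectivity of str(·) on the naturals (Nat.toDigits 10), hence of candN in i ≥ 0 ----

theorem toDigitsCore_acc (f : Nat) : ∀ (n : Nat) (acc : List Char),
    Nat.toDigitsCore 10 f n acc = Nat.toDigitsCore 10 f n [] ++ acc := by
  induction f with
  | zero => intro n acc; simp [Nat.toDigitsCore]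
  | succ f ih =>
      intro n acc
      simp only [Nat.toDigitsCore]
      by_cases h : n / 10 = 0
      · simp [h]
      · simp only [h, if_false]
        rw [ih (n / 10) (Nat.digitChar (n % 10) :: acc), ih (n / 10) [Nat.digitChar (n % 10)]]
        simp

theorem toDigitsCore_fuel : ∀ (f f' n : Nat), n < f → n < f' →
    Nat.toDigitsCore 10 f n [] = Nat.toDigitsCore 10 f' n [] := by
  intro f
  induction f with
  | zero => intro f' n h; omega
  | succ f ih =>
      intro f' n h h'
      match f', h' with
      | Nat.succ f', h' =>
        simp only [Nat.toDigitsCore]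
        by_cases h0 : n / 10 = 0
        · simp [h0]
        · have hn : n / 10 < n := Nat.div_lt_self (by omega) (by omega)
          simp only [h0, if_false]
          rw [toDigitsCore_acc f, toDigitsCore_acc f', ih f' (n / 10) (by omega) (by omega)]

theorem toDigits_step (n : Nat) (h : 10 ≤ n) :
    Nat.toDigits 10 n = Nat.toDigits 10 (n / 10) ++ [Nat.digitChar (n % 10)] := by
  have h0 : ¬ n / 10 = 0 := by omega
  show Nat.toDigitsCore 10 (n + 1) n [] = _
  simp only [Nat.toDigitsCore, h0, if_false]
  rw [toDigitsCore_acc n (n / 10)]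
  have : Nat.toDigitsCore 10 n (n / 10) [] = Nat.toDigitsCore 10 (n / 10 + 1) (n / 10) [] :=
    toDigitsCore_fuel n (n / 10 + 1) (n / 10) (by omega) (by omega)
  rw [this]; rfl

theorem toDigits_small (n : Nat) (h : n < 10) : Nat.toDigits 10 n = [Nat.digitChar n] := by
  have h0 : n / 10 = 0 := by omega
  have h1 : n % 10 = n := by omega
  show Nat.toDigitsCore 10 (n + 1) n [] = _
  simp [Nat.toDigitsCore, h0, h1]

theorem toDigits_ne_nil (n : Nat) : Nat.toDigits 10 n ≠ [] := by
  by_cases h : n < 10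
  · rw [toDigits_small n h]; simp
  · rw [toDigits_step n (by omega)]; simp

theorem digitChar_inj (a b : Nat) (ha : a < 10) (hb : b < 10)
    (h : Nat.digitChar a = Nat.digitChar b) : a = b := by
  interval_cases a <;> interval_cases b <;> simp_all [Nat.digitChar]

theorem toDigits_inj (n : Nat) : ∀ m : Nat, Nat.toDigits 10 n = Nat.toDigits 10 m → n = m := by
  induction n using Nat.strong_induction_on with
  | _ n ih =>
    intro m h
    by_cases hn : n < 10 <;> by_cases hm : m < 10
    · rw [toDigits_small n hn, toDigits_small m hm] at h
      exact digitChar_inj n m hn hm (by simpa using h)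
    · exfalso
      have hpos : 0 < (Nat.toDigits 10 (m / 10)).length :=
        List.length_pos_of_ne_nil (toDigits_ne_nil _)
      have hlen := congrArg List.length h
      rw [toDigits_small n hn, toDigits_step m (by omega)] at hlen
      simp only [List.length_append, List.length_cons, List.length_nil] at hlen
      omega
    · exfalso
      have hpos : 0 < (Nat.toDigits 10 (n / 10)).length :=
        List.length_pos_of_ne_nil (toDigits_ne_nil _)
      have hlen := congrArg List.length h
      rw [toDigits_step n (by omega), toDigits_small m hm] at hlen
      simp only [List.length_append, List.length_cons, List.length_nil] at hlen
      omega
    · rw [toDigits_step n (by omega), toDigits_step m (by omega)] at h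
      have h2 := List.append_inj' h (by rfl)
      have hq : n / 10 = m / 10 :=
        ih (n / 10) (Nat.div_lt_self (by omega) (by omega)) (m / 10) h2.1
      have hr : n % 10 = m % 10 :=
        digitChar_inj _ _ (Nat.mod_lt _ (by omega)) (Nat.mod_lt _ (by omega)) (by simpa using h2.2)
      omega

theorem candN_inj (name : String) (i j : Int) (hi : 0 ≤ i) (hj : 0 ≤ j)
    (h : candN name i = candN name j) : i = j := by
  have h' := congrArg String.toList h
  simp only [candN, String.toList_append, PySem.Int.toList_toStr, List.append_assoc] at h'
  have h2 : PySem.Int.toChars i = PySem.Int.toChars j :=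
    List.append_cancel_left (List.append_cancel_left h')
  simp only [PySem.Int.toChars, if_neg (by omega : ¬ i < 0), if_neg (by omega : ¬ j < 0)] at h2
  have := toDigits_inj i.toNat j.toNat h2
  omega

-- ---- the two while-loops as scans over candidate indices ----

theorem uunGo_eq_bScan (name : String) (att : List String) :
    ∀ (fuel : Nat) (i : Int), uunGo name att (candN name i) (i + 1) fuel = candN name (bScan name att i fuel) := by
  intro fuel
  induction fuel with
  | zero => intro i; rfl
  | succ f ih =>
      intro i
      simp only [uunGo, bScan, candN]
      split
      · exact ih (i + 1)
      · rfl

theorem uun_char (name : String) (att : List String) :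
    updated_user_name name att =
      if name ∈ att then candN name (bScan name att 2 att.length) else name := by
  unfold updated_user_name
  by_cases h : name ∈ att
  · simp only [uunGo, if_pos h]
    exact uunGo_eq_bScan name att att.length 2
  · simp only [uunGo, if_neg h]

theorem bScan_ge (name : String) (att : List String) :
    ∀ (f : Nat) (i : Int), i ≤ bScan name att i f := by
  intro f
  induction f with
  | zero => intro i; simp [bScan]
  | succ f ih =>
      intro i
      simp only [bScan]
      split
      · have := ih (i + 1); omega
      · omega

theorem bScan_mem_below (name : String) (att : List String) :
    ∀ (f : Nat) (i j : Int), i ≤ j → j < bScan name att i f → candN name j ∈ att := by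
  intro f
  induction f with
  | zero => intro i j h1 h2; simp [bScan] at h2; omega
  | succ f ih =>
      intro i j h1 h2
      simp only [bScan] at h2
      by_cases hm : (name ++ " " ++ PySem.Int.toStr i) ∈ att
      · rw [if_pos hm] at h2
        by_cases hj : j = i
        · subst hj; exact hm
        · exact ih (i + 1) j (by omega) h2
      · rw [if_neg hm] at h2; omega

theorem bScan_full (name : String) (att : List String) :
    ∀ (f : Nat) (i : Int), candN name (bScan name att i f) ∈ att →
      ∀ j, i ≤ j → j ≤ i + (f : Int) → candN name j ∈ att := by
  intro f
  induction f with
  | zero =>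
      intro i h j h1 h2
      simp only [bScan] at h
      have : j = i := by omega
      subst this; exact h
  | succ f ih =>
      intro i h j h1 h2
      simp only [bScan] at h
      by_cases hm : (name ++ " " ++ PySem.Int.toStr i) ∈ att
      · rw [if_pos hm] at h
        by_cases hj : j = i
        · subst hj; exact hm
        · exact ih (i + 1) h j (by omega) (by omega)
      · rw [if_neg hm] at h
        exact absurd h hm

theorem bScan_free (name : String) (att : List String) (i : Int) (hi : 2 ≤ i) :
    candN name (bScan name att i att.length) ∉ att := by
  intro hmem
  have hfull := bScan_full name att att.length i hmem
  set L := (List.range (att.length + 1)).map (fun t : Nat => candN name (i + (t : Int))) with hL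
  have hnd : L.Nodup := by
    refine List.Nodup.map_on ?_ (List.nodup_range)
    intro x hx y hy hxy
    have := candN_inj name (i + x) (i + y) (by omega) (by omega) hxy
    omega
  have hsub : L ⊆ att := by
    intro z hz
    rw [hL] at hz
    simp only [List.mem_map, List.mem_range] at hz
    obtain ⟨t, ht, rfl⟩ := hz
    exact hfull (i + t) (by omega) (by omega)
  have hlen : L.length = att.length + 1 := by simp [hL]
  have h1 : L.toFinset.card = L.length := List.toFinset_card_of_nodup hnd
  have h2 : L.toFinset ⊆ att.toFinset := by
    intro x hx; simp only [List.mem_toFinset] at hx ⊢; exact hsub hx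
  have := Finset.card_le_card h2
  have := att.toFinset_card_le
  omega

theorem bScan_succ (name : String) (att : List String) (i : Int) (f : Nat) :
    bScan name att i (f + 1) = if candN name i ∈ att then bScan name att (i + 1) f else i := rfl

theorem bScan_succ_of_free (name : String) (att : List String) :
    ∀ (f : Nat) (i : Int), candN name (bScan name att i f) ∉ att →
      bScan name att i (f + 1) = bScan name att i f := by
  intro f
  induction f with
  | zero =>
      intro i h
      rw [bScan_succ]
      simp only [bScan] at h
      rw [if_neg h]
      rfl
  | succ f ih =>
      intro i h
      rw [bScan_succ name att i (f + 1), bScan_succ name att i f]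
      rw [bScan_succ name att i f] at h
      by_cases hm : candN name i ∈ att
      · simp only [if_pos hm] at h ⊢
        exact ih (i + 1) h
      · simp only [if_neg hm]

theorem bScan_ext (name : String) (att : List String) (f : Nat) (i : Int)
    (h : candN name (bScan name att i f) ∉ att) :
    ∀ d : Nat, bScan name att i (f + d) = bScan name att i f := by
  intro d
  induction d with
  | zero => rfl
  | succ d ih =>
      have : f + (d + 1) = (f + d) + 1 := by omega
      rw [this, bScan_succ_of_free name att (f + d) i (by rw [ih]; exact h), ih]

theorem bScan_congr (name : String) (att att' : List String)
    (h : ∀ x, x ∈ att ↔ x ∈ att') :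
    ∀ (f : Nat) (i : Int), bScan name att i f = bScan name att' i f := by
  intro f
  induction f with
  | zero => intro i; rfl
  | succ f ih =>
      intro i
      simp only [bScan]
      by_cases hm : (name ++ " " ++ PySem.Int.toStr i) ∈ att
      · rw [if_pos hm, if_pos ((h _).mp hm)]
        exact ih (i + 1)
      · rw [if_neg hm, if_neg (fun hx => hm ((h _).mpr hx))]

theorem bScan_uniq (name : String) (att : List String) (i0 : Int) (hi0 : 2 ≤ i0)
    (hskip : ∀ j, 2 ≤ j → j < i0 → candN name j ∈ att)
    (f1 f2 : Nat)
    (hfree1 : candN name (bScan name att 2 f1) ∉ att)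
    (hfree2 : candN name (bScan name att i0 f2) ∉ att) :
    bScan name att 2 f1 = bScan name att i0 f2 := by
  set k1 := bScan name att 2 f1 with hk1
  set k2 := bScan name att i0 f2 with hk2
  have hg1 : (2 : Int) ≤ k1 := bScan_ge name att f1 2
  have hg2 : i0 ≤ k2 := bScan_ge name att f2 i0
  rcases lt_trichotomy k1 k2 with h | h | h
  · exfalso
    by_cases hlt : k1 < i0
    · exact hfree1 (hskip k1 hg1 hlt)
    · exact hfree1 (bScan_mem_below name att f2 i0 k1 (by omega) h)
  · exact h
  · exact absurd (bScan_mem_below name att f1 2 k2 (by omega) h) hfree2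

-- ---- A's interleaved loop = categorize, then A's dedup loop over the smiling candidates ----

theorem main_split (vs : List (String × Bool × Int)) :
    ∀ (s : List (String × Int)) (ns u : List (String × Bool × Int)),
    vs.foldl
      (fun acc p =>
        match acc with
        | (smiling, not_smiling, unidentified) =>
          if p.1 = "" then (smiling, not_smiling, unidentified ++ [p])
          else
            let username := p.1
            let updated_username := updated_user_name username (smiling.map (·.1))
            if p.2.1 then (smiling ++ [(updated_username, p.2.2)], not_smiling, unidentified)
            else (smiling, not_smiling ++ [p], unidentified))
      (s, ns, u)
    =
    (((vs.filter (fun p => p.1 != "" && p.2.1)).map (fun p => (p.1, p.2.2))).foldl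
        (fun sm c => sm ++ [(updated_user_name c.1 (sm.map (·.1)), c.2)]) s,
     ns ++ vs.filter (fun p => p.1 != "" && !p.2.1),
     u ++ vs.filter (fun p => p.1 == "")) := by
  induction vs with
  | nil => intro s ns u; simp
  | cons p vs ih =>
    intro s ns u
    by_cases hp0 : p.1 = ""
    · have hcond3 : (p.1 == "") = true := by simp [hp0]
      simp only [List.foldl_cons, List.filter_cons, hcond3, if_pos hp0, if_true]
      rw [ih s ns (u ++ [p])]
      simp [hp0, List.append_assoc]
    · by_cases hp1 : p.2.1 = true
      · have hcond3 : (p.1 == "") = false := by simp [hp0]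
        simp only [List.foldl_cons, List.filter_cons, hcond3,
          if_neg hp0, hp1, if_true, Bool.false_eq_true, if_false]
        rw [ih]
        simp [hp0]
      · have hb : p.2.1 = false := by simpa using hp1
        have hcond3 : (p.1 == "") = false := by simp [hp0]
        simp only [List.foldl_cons, List.filter_cons, hcond3,
          if_neg hp0, hb, Bool.false_eq_true, if_false]
        rw [ih s (ns ++ [p]) u]
        simp [List.append_assoc, hp0]

-- ---- B's set+counter dedup loop simulates A's rescan-from-2 dedup loop ----

theorem sim (cands : List (String × Int)) :
    ∀ (sm : List (String × Int)) (taken : PySem.Set String) (ctr : PySem.Dict String Int),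
    (∀ x, x ∈ taken ↔ x ∈ sm.map (·.1)) →
    (∀ n, 2 ≤ ctr.getD n 2) →
    (∀ n j, 2 ≤ j → j < ctr.getD n 2 → candN n j ∈ sm.map (·.1)) →
    (cands.foldl
      (fun (acc : List (String × Int) × PySem.Set String × PySem.Dict String Int) c =>
        match acc with
        | (smiling, taken, next_i) =>
          if c.1 ∈ taken then
            let i0 := next_i.getD c.1 2
            let k := bScan c.1 taken i0 (taken.length + 1)
            let final := c.1 ++ " " ++ PySem.Int.toStr k
            (smiling ++ [(final, c.2)], PySem.Set.add taken final, next_i.insert c.1 (k + 1))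
          else
            (smiling ++ [(c.1, c.2)], PySem.Set.add taken c.1, next_i))
      (sm, taken, ctr)).1
    = cands.foldl (fun sm c => sm ++ [(updated_user_name c.1 (sm.map (·.1)), c.2)]) sm := by
  induction cands with
  | nil => intro sm taken ctr _ _ _; rfl
  | cons c cands ih =>
    intro sm taken ctr hm hc2 hcm
    simp only [List.foldl_cons]
    by_cases hmem : c.1 ∈ taken
    · -- collision: A rescans from 2 over the smiling names, B scans from its stored counter
      simp only [if_pos hmem]
      have hnames : c.1 ∈ sm.map (·.1) := (hm c.1).mp hmem
      set names := sm.map (·.1) with hN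
      set i0 := ctr.getD c.1 2 with hi0def
      have hi0 : 2 ≤ i0 := hc2 c.1
      have hfreeT : candN c.1 (bScan c.1 taken i0 taken.length) ∉ taken :=
        bScan_free c.1 taken i0 hi0
      have hcong : bScan c.1 taken i0 taken.length = bScan c.1 names i0 taken.length :=
        bScan_congr c.1 taken names hm taken.length i0
      have hfreeB : candN c.1 (bScan c.1 names i0 taken.length) ∉ names := by
        rw [← hcong]; intro hx; exact hfreeT ((hm _).mpr hx)
      have hfreeA : candN c.1 (bScan c.1 names 2 names.length) ∉ names :=
        bScan_free c.1 names 2 (by omega)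
      have huniq : bScan c.1 names 2 names.length = bScan c.1 names i0 taken.length :=
        bScan_uniq c.1 names i0 hi0 (fun j h2 hj => hcm c.1 j h2 hj)
          names.length taken.length hfreeA hfreeB
      have hkval : bScan c.1 taken i0 (taken.length + 1) = bScan c.1 names i0 taken.length := by
        rw [bScan_ext c.1 taken taken.length i0 hfreeT 1, hcong]
      rw [hkval, uun_char, if_pos hnames, huniq]
      set k := bScan c.1 names i0 taken.length with hkdef
      have hkge : i0 ≤ k := hkdef ▸ bScan_ge c.1 names taken.length i0
      simp only [candN] at hfreeB ⊢
      apply ih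
      · intro x
        rw [PySem.Set.mem_add]
        simp only [List.map_append, List.mem_append]
        constructor
        · rintro (hx | rfl)
          · exact Or.inl ((hm x).mp hx)
          · exact Or.inr (by simp)
        · rintro (hx | hx)
          · exact Or.inl ((hm x).mpr hx)
          · simp at hx; exact Or.inr hx
      · intro n
        rw [PySem.Dict.getD_insert]
        split
        · omega
        · exact hc2 n
      · intro n j h2 hj
        rw [PySem.Dict.getD_insert] at hj
        simp only [List.map_append, List.mem_append]
        by_cases hn : n = c.1
        · subst hn
          rw [if_pos rfl] at hj
          by_cases hjk : j = k
          · subst hjk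
            exact Or.inr (by simp [candN])
          · by_cases hji : j < i0
            · exact Or.inl (hcm c.1 j h2 hji)
            · exact Or.inl (bScan_mem_below c.1 names taken.length i0 j (by omega)
                (by rw [← hkdef]; omega))
        · rw [if_neg hn] at hj
          exact Or.inl (hcm n j h2 hj)
    · -- fresh name: both keep it as is
      simp only [if_neg hmem]
      have hnames : c.1 ∉ sm.map (·.1) := fun hx => hmem ((hm c.1).mpr hx)
      have hA : updated_user_name c.1 (sm.map (·.1)) = c.1 := by
        rw [uun_char, if_neg hnames]
      rw [hA]
      apply ih
      · intro x
        rw [PySem.Set.mem_add]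
        simp only [List.map_append, List.mem_append]
        constructor
        · rintro (hx | rfl)
          · exact Or.inl ((hm x).mp hx)
          · exact Or.inr (by simp)
        · rintro (hx | hx)
          · exact Or.inl ((hm x).mpr hx)
          · simp at hx; exact Or.inr hx
      · exact hc2
      · intro n j h2 hj
        simp only [List.map_append, List.mem_append]
        exact Or.inl (hcm n j h2 hj)

-- ===== VERDICT (by name: the statement is the Claim_ definition above) =====
theorem summerize_results_spec : Claim_equal_summerize_results := by
  intro participants _
  unfold Spec_summerize_results summerize_results summerize_results_alt
  rw [main_split]
  rw [← sim _ [] PySem.Set.empty PySem.Dict.empty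
    (by intro x; simp [PySem.Set.empty])
    (by intro n; rw [PySem.Dict.getD_empty])
    (by intro n j h2 hj; rw [PySem.Dict.getD_empty] at hj; omega)]
  simp
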